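-- pv_equiv track=rewrite | github.com/williamcorney/Jazz-Piano | Jazz Piano.py | extend_scale
-- ===== SOURCE A (Python) =====
-- def extend_scale(intervals, num_octaves, root_note=60, descending=False):
--
--     midi_notes = []
--     intervals = [int(interval) for interval in intervals]
--     for octave in range(num_octaves): midi_notes += [root_note + interval + 12 * octave for interval in intervals]
--     if descending:
--         descending_notes = []
--         for octave in reversed(range(num_octaves)):descending_notes += [root_note + interval + 12 * octave for interval in reversed(intervals[:-1])]
--         midi_notes += descending_notes
--     return midi_notes
-- ===== SOURCE B (Python) =====
-- def extend_scale(intervals, num_octaves, root_note=60, descending=False):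
--     ivs = [int(v) for v in intervals]
--     ascending = [root_note + iv + 12 * octave
--                  for octave in range(num_octaves) for iv in ivs]
--     if not descending or not ivs:
--         return ascending
--     L = len(ivs)
--     rev = ascending[::-1]
--     return ascending + [v for i, v in enumerate(rev) if i % L != 0]
-- ===== Notes on version B (the rewrite author's own statement) =====
-- stated objective: alternative
-- what changed: B builds only the ascending list, then derives the descending tail by reversing it and dropping every L-th position by index filtering, instead of A's second octave loop that recomputes root+interval+12*octave over reversed(intervals[:-1]).
import Mathlib
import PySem

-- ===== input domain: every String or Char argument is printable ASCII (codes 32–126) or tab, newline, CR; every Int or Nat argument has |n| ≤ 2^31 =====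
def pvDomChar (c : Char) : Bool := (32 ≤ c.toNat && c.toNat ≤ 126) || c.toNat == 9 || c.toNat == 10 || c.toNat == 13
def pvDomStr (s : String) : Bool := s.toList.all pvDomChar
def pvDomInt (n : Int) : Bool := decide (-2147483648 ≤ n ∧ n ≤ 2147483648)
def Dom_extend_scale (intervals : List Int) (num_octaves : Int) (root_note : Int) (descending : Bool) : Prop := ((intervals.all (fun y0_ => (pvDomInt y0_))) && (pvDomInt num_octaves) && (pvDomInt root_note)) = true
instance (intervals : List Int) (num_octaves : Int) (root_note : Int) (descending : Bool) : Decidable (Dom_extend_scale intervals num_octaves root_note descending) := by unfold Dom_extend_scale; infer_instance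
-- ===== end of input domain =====

-- B derives the descending tail from the already-built ascending list (reverse, then drop every
-- L-th position by enumerate-and-filter) instead of A's second octave loop that recomputes
-- root+interval+12*octave over reversed(intervals[:-1]); alternative decomposition, same cost.

-- ===== PORT A =====
-- The growing accumulator lists (midi_notes, descending_notes) are kept as Array Int
-- (Python lists are dynamic arrays; '+=' extends in amortized linear time) and read out
-- with .toList at the end; every step and intermediate value is A's.
def extend_scale (intervals : List Int) (num_octaves : Int) (root_note : Int) (descending : Bool) : List Int :=
  let intervals := intervals.map (fun interval => interval)  -- int(interval) is the identity on ints
  let midi_notes : Array Int := (PySem.List.pyRange 0 num_octaves 1).foldl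
    (fun acc octave => acc ++ (intervals.map (fun interval => root_note + interval + 12 * octave)).toArray) #[]
  if descending then
    let descending_notes : Array Int := ((PySem.List.pyRange 0 num_octaves 1).reverse).foldl
      (fun acc octave => acc ++ ((PySem.List.slice intervals none (some (-1))).reverse.map
        (fun interval => root_note + interval + 12 * octave)).toArray) #[]
    (midi_notes ++ descending_notes).toList
  else
    midi_notes.toList

-- ===== PORT B =====
def extend_scale_alt (intervals : List Int) (num_octaves : Int) (root_note : Int) (descending : Bool) : List Int :=
  let ivs := intervals.map (fun v => v)  -- int(v) is the identity on ints
  let ascending : List Int := (PySem.List.pyRange 0 num_octaves 1).flatMap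
    (fun octave => ivs.map (fun iv => root_note + iv + 12 * octave))
  if !descending || ivs.isEmpty then
    ascending
  else
    let L : Int := ivs.length
    let rev := ascending.reverse  -- ascending[::-1]
    ascending ++ ((PySem.List.enumerate rev).filter
        (fun p => PySem.Int.mod p.1 L ≠ 0)).map (fun p => p.2)

-- ===== PRECONDITION & SPEC =====
def Spec_extend_scale (intervals : List Int) (num_octaves : Int) (root_note : Int) (descending : Bool) (out : List Int) : Prop := out = extend_scale_alt intervals num_octaves root_note descending
instance (intervals : List Int) (num_octaves : Int) (root_note : Int) (descending : Bool) (out : List Int) : Decidable (Spec_extend_scale intervals num_octaves root_note descending out) := by unfold Spec_extend_scale; infer_instance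

-- ===== CLAIM (what is proved, stated in full; the proofs are below) =====
def Claim_equal_extend_scale : Prop := ∀ (intervals : List Int) (num_octaves : Int) (root_note : Int) (descending : Bool), Dom_extend_scale intervals num_octaves root_note descending → Spec_extend_scale intervals num_octaves root_note descending (extend_scale intervals num_octaves root_note descending)

-- ===== LEMMAS AND PROOFS =====

-- A's 'out += block' loop over an Array accumulator, read back as a list, is init ++ flatMap.
theorem pv_foldl_array (l : List Int) (g : Int → List Int) (a : Array Int) :
    (l.foldl (fun acc x => acc ++ (g x).toArray) a).toList = a.toList ++ l.flatMap g := by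
  induction l generalizing a with
  | nil => simp
  | cons x xs ih => simp [ih, List.flatMap_cons]

theorem pv_map_getD_range (l : List Int) :
    (List.range l.length).map (fun i => l.getD i 0) = l := by
  induction l with
  | nil => simp
  | cons x xs ih =>
    rw [List.length_cons, List.range_succ_eq_map, List.map_cons, List.map_map]
    simpa [Function.comp_def] using ih

-- Index-filtering a concatenation of equal-length blocks by i % L ≠ 0 drops each block's head.
theorem pv_filter_blocks (L : Nat) (bs : List (List Int))
    (h : ∀ b ∈ bs, b.length = L) :
    ((List.range (bs.flatMap id).length).filter (fun i => decide (¬ i % L = 0))).map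
      (fun i => (bs.flatMap id).getD i 0) = bs.flatMap List.tail := by
  induction bs with
  | nil => simp
  | cons b bs ih =>
    have hb : b.length = L := h b (by simp)
    have ihb := ih (fun x hx => h x (by simp [hx]))
    have hflat : (b :: bs).flatMap id = b ++ bs.flatMap id := by simp [List.flatMap_cons]
    rw [hflat, List.flatMap_cons, List.length_append, hb, List.range_add,
        List.filter_append, List.map_append]
    congr 1
    · cases b with
      | nil => rw [← hb]; simp
      | cons y ys => ?_
      have hys : L = ys.length + 1 := by simpa using hb.symm
      subst hys
      have h1 : (List.range (ys.length + 1)).filter (fun i => decide (¬ i % (ys.length + 1) = 0))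
          = (List.range (ys.length + 1)).filter (fun i => decide (¬ i = 0)) := by
        apply List.filter_congr
        intro i hi
        simp [Nat.mod_eq_of_lt (List.mem_range.mp hi)]
      rw [h1, List.range_succ_eq_map]
      have h2 : ((0 : Nat) :: (List.range ys.length).map Nat.succ).filter
            (fun i => decide (¬ i = 0)) = (List.range ys.length).map Nat.succ := by
        rw [List.filter_cons]
        simp [List.filter_eq_self.mpr]
      rw [h2, List.map_map]
      have h3 : ∀ i ∈ List.range ys.length,
          ((fun i => ((y :: ys) ++ bs.flatMap id).getD i 0) ∘ Nat.succ) i = ys.getD i 0 := by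
        intro i hi
        have hi' : i < ys.length := List.mem_range.mp hi
        simp [Function.comp_def, List.getElem?_append_left, hi']
      rw [List.map_congr_left h3, pv_map_getD_range]
      simp
    · have h4 : ((List.range (bs.flatMap id).length).map (L + ·)).filter
            (fun i => decide (¬ i % L = 0))
          = ((List.range (bs.flatMap id).length).filter (fun i => decide (¬ i % L = 0))).map
            (L + ·) := by
        rw [List.filter_map]
        exact congrArg (List.map (L + ·))
          (List.filter_congr (fun i _ => by simp [Function.comp_def, Nat.add_mod_left]))
      rw [h4, List.map_map]
      have h5 : ∀ i ∈ (List.range (bs.flatMap id).length).filter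
            (fun i => decide (¬ i % L = 0)),
          ((fun i => (b ++ bs.flatMap id).getD i 0) ∘ (L + ·)) i = (bs.flatMap id).getD i 0 := by
        intro i _
        simp [← hb, List.getElem?_append_right]
      rw [List.map_congr_left h5, ihb]

-- B's reversed-and-index-filtered ascending list equals A's recomputed descending tail.
theorem pv_tail_eq (ivs : List Int) (R : List Int) (f : Int → Int → Int) :
    ((List.range ((R.flatMap (fun o => ivs.map (f o))).reverse.length)).filter
       (fun k => decide (¬ k % ivs.length = 0))).map
       (fun k => (R.flatMap (fun o => ivs.map (f o))).reverse.getD k 0)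
    = R.reverse.flatMap (fun o => ivs.dropLast.reverse.map (f o)) := by
  have hrev : (R.flatMap (fun o => ivs.map (f o))).reverse
      = ((R.reverse.map (fun o => (ivs.map (f o)).reverse)).flatMap id) := by
    rw [List.reverse_flatMap, List.flatMap_map]
    rfl
  rw [hrev, pv_filter_blocks ivs.length _
      (by intro b hb; simp only [List.mem_map] at hb; obtain ⟨o, _, rfl⟩ := hb; simp),
    List.flatMap_map]
  refine List.flatMap_congr (fun o _ => ?_)
  simp [List.tail_reverse, ← List.map_dropLast, List.map_reverse]

-- ===== VERDICT (by name: the statement is the Claim_ definition above) =====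
theorem extend_scale_spec : Claim_equal_extend_scale := by
  intro intervals num_octaves root_note descending _
  unfold Spec_extend_scale extend_scale extend_scale_alt
  simp only [List.map_id', Array.toList_append, pv_foldl_array, Array.toList_empty,
    List.nil_append, PySem.List.slice_to_neg_one]
  cases descending with
  | false => simp
  | true =>
    by_cases hi : intervals = []
    · subst hi
      simp
    · rw [if_pos rfl, if_neg (by simp [hi])]
      congr 1
      rw [PySem.List.enumerate_eq_map_pyRange (d := (0 : Int)), List.filter_map, List.map_map]
      simp only [PySem.List.len_eq]
      rw [PySem.List.pyRange_zero_nat, List.filter_map, List.map_map]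
      have hp : (((fun (p : Int × Int) => decide (PySem.Int.mod p.1 (intervals.length : Int) ≠ 0)) ∘
            (fun j => (j, PySem.List.pyGetD
              ((PySem.List.pyRange 0 num_octaves 1).flatMap
                (fun octave => intervals.map (fun iv => root_note + iv + 12 * octave))).reverse
              j 0))) ∘ (fun (k : Nat) => ((k : Int))))
          = fun (k : Nat) => decide (¬ k % intervals.length = 0) := by
        funext k
        simp [PySem.Int.mod_natCast, Int.natCast_dvd_natCast, Nat.dvd_iff_mod_eq_zero]
      have hg : (((fun (p : Int × Int) => p.2) ∘
            (fun j => (j, PySem.List.pyGetD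
              ((PySem.List.pyRange 0 num_octaves 1).flatMap
                (fun octave => intervals.map (fun iv => root_note + iv + 12 * octave))).reverse
              j 0))) ∘ (fun (k : Nat) => ((k : Int))))
          = fun (k : Nat) => ((PySem.List.pyRange 0 num_octaves 1).flatMap
                (fun octave => intervals.map (fun iv => root_note + iv + 12 * octave))).reverse.getD
              k 0 := by
        funext k
        simp [PySem.List.pyGetD_natCast]
      rw [hp, hg]
      exact (pv_tail_eq intervals (PySem.List.pyRange 0 num_octaves 1)
        (fun o iv => root_note + iv + 12 * o)).symm
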